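-- pv_equiv track=rewrite | github.com/mvp-krayu/krayu-program-intelligence | scripts/pios/42.7/execlens_topology_adapter.py | build_nav_lookup
-- ===== SOURCE A (Python) =====
-- def build_nav_lookup(all_nav_bindings: list[list[dict]]) -> dict:
--     """
--     Merge navigation bindings from all queries into a single lookup.
--     Keyed by link ID. Resolved entries take precedence over unresolved.
--     """
--     lookup = {}
--     for bindings in all_nav_bindings:
--         for nb in bindings:
--             link = nb["link"]
--             # Prefer resolved entry
--             if link not in lookup or nb.get("resolved"):
--                 lookup[link] = nb
--     return lookup
-- ===== SOURCE B (Python) =====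
-- def build_nav_lookup(all_nav_bindings: list[list[dict]]) -> dict:
--     """
--     Merge navigation bindings from all queries into a single lookup.
--     Keyed by link ID. Resolved entries take precedence over unresolved.
--     Two sequential passes over the flattened bindings: first-seen defaults,
--     then the last resolved binding for each link overwrites.
--     """
--     flat = [nb for bindings in all_nav_bindings for nb in bindings]
--     lookup = {}
--     for nb in flat:
--         lookup.setdefault(nb["link"], nb)
--     for nb in flat:
--         if nb.get("resolved"):
--             lookup[nb["link"]] = nb
--     return lookup
-- ===== Notes on version B (the rewrite author's own statement) =====
-- stated objective: alternative
-- what changed: Replaces A's single interleaved loop with a combined membership/resolved test by two sequential passes over the flattened bindings: a setdefault pass fixing first-seen defaults and key order, then a pass letting the last resolved binding per link overwrite.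
import Mathlib
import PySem

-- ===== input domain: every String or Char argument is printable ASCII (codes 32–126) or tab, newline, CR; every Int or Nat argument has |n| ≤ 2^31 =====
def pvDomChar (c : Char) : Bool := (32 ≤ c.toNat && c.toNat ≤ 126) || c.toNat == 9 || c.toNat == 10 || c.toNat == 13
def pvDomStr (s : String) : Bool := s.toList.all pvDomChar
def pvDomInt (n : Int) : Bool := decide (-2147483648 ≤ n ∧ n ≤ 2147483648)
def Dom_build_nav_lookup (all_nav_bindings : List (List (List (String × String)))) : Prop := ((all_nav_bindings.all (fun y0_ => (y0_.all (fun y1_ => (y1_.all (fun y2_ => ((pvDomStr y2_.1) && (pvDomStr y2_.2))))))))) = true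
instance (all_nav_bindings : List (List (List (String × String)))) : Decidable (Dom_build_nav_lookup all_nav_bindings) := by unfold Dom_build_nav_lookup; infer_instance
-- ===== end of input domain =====

-- B restructures A's single loop (membership-or-resolved test) into two sequential passes
-- over the flattened bindings: setdefault for first-seen defaults, then last-resolved-wins.

-- shared helpers: nb["link"] (total stand-in; Pre_ guarantees the key is present) and truthiness of nb.get("resolved")
def pvLink (nb : List (String × String)) : String :=
  ((PySem.Dict.mk nb).get? "link").getD ""

def pvResolved (nb : List (String × String)) : Bool :=
  match (PySem.Dict.mk nb).get? "resolved" with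
  | some s => s != ""
  | none => false

-- ===== PORT A =====
def navStepA (lookup : PySem.Dict String (List (String × String))) (nb : List (String × String)) : PySem.Dict String (List (String × String)) :=
  let link := pvLink nb
  if !(lookup.contains link) || pvResolved nb then lookup.insert link nb else lookup

def build_nav_lookup (all_nav_bindings : List (List (List (String × String)))) : List (String × List (String × String)) :=
  (all_nav_bindings.foldl (fun lookup bindings => bindings.foldl navStepA lookup) PySem.Dict.empty).items

-- ===== PORT B =====
def navStep1 (d : PySem.Dict String (List (String × String))) (nb : List (String × String)) : PySem.Dict String (List (String × String)) :=
  d.setdefault (pvLink nb) nb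

def navStep2 (d : PySem.Dict String (List (String × String))) (nb : List (String × String)) : PySem.Dict String (List (String × String)) :=
  if pvResolved nb then d.insert (pvLink nb) nb else d

def build_nav_lookup_alt (all_nav_bindings : List (List (List (String × String)))) : List (String × List (String × String)) :=
  let flat := all_nav_bindings.flatten
  let lookup := flat.foldl navStep1 PySem.Dict.empty
  (flat.foldl navStep2 lookup).items

-- ===== PRECONDITION & SPEC =====
-- Pre_ excludes exactly the inputs where some binding lacks the "link" key, on which Python A raises KeyError.
def Pre_build_nav_lookup (all_nav_bindings : List (List (List (String × String)))) : Prop :=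
  (all_nav_bindings.all (fun bindings => bindings.all (fun nb => (PySem.Dict.mk nb).contains "link"))) = true
instance (all_nav_bindings : List (List (List (String × String)))) : Decidable (Pre_build_nav_lookup all_nav_bindings) := by unfold Pre_build_nav_lookup; infer_instance

def pvWitness_build_nav_lookup : (List (List (List (String × String)))) :=
  [[[("link", "a"), ("resolved", "")], [("link", "b"), ("resolved", "yes")]], [[("link", "a"), ("resolved", "yes")]]]

def Spec_build_nav_lookup (all_nav_bindings : List (List (List (String × String)))) (out : List (String × List (String × String))) : Prop := out = build_nav_lookup_alt all_nav_bindings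
instance (all_nav_bindings : List (List (List (String × String)))) (out : List (String × List (String × String))) : Decidable (Spec_build_nav_lookup all_nav_bindings out) := by unfold Spec_build_nav_lookup; infer_instance

-- ===== CLAIM (what is proved, stated in full; the proofs are below) =====
def Claim_equal_build_nav_lookup : Prop := ∀ (all_nav_bindings : List (List (List (String × String)))), Dom_build_nav_lookup all_nav_bindings → Pre_build_nav_lookup all_nav_bindings → Spec_build_nav_lookup all_nav_bindings (build_nav_lookup all_nav_bindings)

-- ===== LEMMAS AND PROOFS =====

-- inserting the value a key already maps to changes nothing
lemma ins_self {ν : Type} (d : PySem.Dict String ν) (k : String) (v : ν)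
    (hnd : d.keys.Nodup) (h : d.get? k = some v) : d.insert k v = d := by
  have hc : d.contains k = true := by rw [PySem.Dict.contains_eq_isSome_get?, h]; rfl
  apply PySem.Dict.ext
  rw [PySem.Dict.items_insert, if_pos hc]
  conv_rhs => rw [← List.map_id d.items]
  apply List.map_congr_left
  intro p hp
  by_cases hk : p.1 = k
  · simp only [hk, beq_self_eq_true, if_true]
    have : d.get? p.1 = some p.2 := PySem.Dict.get?_of_mem_items d (by simpa using hp) hnd
    rw [hk, h] at this
    cases this
    rw [← hk]
    rfl
  · simp [hk]

-- overwriting a present key commutes with appending a fresh one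
lemma insert_insert_comm_fresh {ν : Type} (d : PySem.Dict String ν) {k j : String} (v w : ν)
    (hk : d.contains k = true) (hj : d.contains j = false) :
    (d.insert k v).insert j w = (d.insert j w).insert k v := by
  have hjk : (j == k) = false := by
    by_cases h : j = k
    · subst h; rw [hk] at hj; cases hj
    · simp [h]
  apply PySem.Dict.ext
  have hcj : (d.insert k v).contains j = false := by
    rw [PySem.Dict.contains_insert, hjk, hj]; rfl
  have hck : (d.insert j w).contains k = true := by
    rw [PySem.Dict.contains_insert, hk]; simp
  rw [PySem.Dict.items_insert_of_not_contains _ _ hcj,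
      PySem.Dict.items_insert, if_pos hk,
      PySem.Dict.items_insert, if_pos hck,
      PySem.Dict.items_insert_of_not_contains _ _ hj,
      List.map_append]
  have hne : j ≠ k := by simpa using hjk
  simp [hne]

-- navStep1 never changes an existing entry
lemma get?_foldl_step1 (l : List (List (String × String))) (d : PySem.Dict String (List (String × String)))
    {k : String} {v : List (String × String)} (h : d.get? k = some v) :
    (l.foldl navStep1 d).get? k = some v := by
  induction l generalizing d with
  | nil => exact h
  | cons nb t ih =>
    rw [List.foldl_cons]
    apply ih
    unfold navStep1
    cases hc : d.contains (pvLink nb) with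
    | true => rw [PySem.Dict.setdefault_of_contains _ _ hc]; exact h
    | false =>
      rw [PySem.Dict.setdefault_of_not_contains _ _ hc]
      have hne : k ≠ pvLink nb := by
        intro he
        rw [PySem.Dict.contains_eq_isSome_get?, ← he, h] at hc
        cases hc
      rw [PySem.Dict.get?_insert_of_ne _ _ hne]
      exact h

lemma nodup_foldl_step1 (l : List (List (String × String))) (d : PySem.Dict String (List (String × String)))
    (h : d.keys.Nodup) : (l.foldl navStep1 d).keys.Nodup := by
  induction l generalizing d with
  | nil => exact h
  | cons nb t ih =>
    rw [List.foldl_cons]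
    apply ih
    unfold navStep1
    cases hc : d.contains (pvLink nb) with
    | true => rw [PySem.Dict.setdefault_of_contains _ _ hc]; exact h
    | false => rw [PySem.Dict.setdefault_of_not_contains _ _ hc]; exact PySem.Dict.nodup_keys_insert _ _ _ h

-- overwriting an existing key commutes with the setdefault pass
lemma foldl_step1_insert (l : List (List (String × String))) (d : PySem.Dict String (List (String × String)))
    {k : String} (v : List (String × String)) (hnd : d.keys.Nodup) (hk : d.contains k = true) :
    l.foldl navStep1 (d.insert k v) = (l.foldl navStep1 d).insert k v := by
  induction l generalizing d with
  | nil => rfl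
  | cons nb t ih =>
    rw [List.foldl_cons, List.foldl_cons]
    by_cases he : pvLink nb = k
    · have h1 : navStep1 (d.insert k v) nb = d.insert k v := by
        unfold navStep1
        apply PySem.Dict.setdefault_of_contains
        rw [he, PySem.Dict.contains_insert]; simp
      have h2 : navStep1 d nb = d := by
        unfold navStep1
        apply PySem.Dict.setdefault_of_contains
        rw [he]; exact hk
      rw [h1, h2]
      exact ih d hnd hk
    · have hcc : (d.insert k v).contains (pvLink nb) = d.contains (pvLink nb) := by
        rw [PySem.Dict.contains_insert]
        simp [he]
      cases hc : d.contains (pvLink nb) with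
      | true =>
        rw [hc] at hcc
        rw [show navStep1 (d.insert k v) nb = d.insert k v from PySem.Dict.setdefault_of_contains _ _ hcc,
            show navStep1 d nb = d from PySem.Dict.setdefault_of_contains _ _ hc]
        exact ih d hnd hk
      | false =>
        rw [hc] at hcc
        rw [show navStep1 (d.insert k v) nb = (d.insert k v).insert (pvLink nb) nb from
              PySem.Dict.setdefault_of_not_contains _ _ hcc,
            show navStep1 d nb = d.insert (pvLink nb) nb from PySem.Dict.setdefault_of_not_contains _ _ hc,
            insert_insert_comm_fresh d v nb hk hc]
        apply ih (d.insert (pvLink nb) nb) (PySem.Dict.nodup_keys_insert _ _ _ hnd)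
        rw [PySem.Dict.contains_insert, hk]
        simp

-- the core commuting lemma: A's interleaved loop = pass 2 after pass 1
lemma main_lemma (l : List (List (String × String))) (d : PySem.Dict String (List (String × String)))
    (hnd : d.keys.Nodup) :
    l.foldl navStepA d = l.foldl navStep2 (l.foldl navStep1 d) := by
  induction l generalizing d with
  | nil => rfl
  | cons nb t ih =>
    simp only [List.foldl_cons]
    cases hr : pvResolved nb with
    | false =>
      have h2 : ∀ x, navStep2 x nb = x := by intro x; unfold navStep2; rw [hr]; rfl
      have hA : navStepA d nb = navStep1 d nb := by
        unfold navStepA navStep1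
        cases hc : d.contains (pvLink nb) with
        | true => rw [hr, PySem.Dict.setdefault_of_contains _ _ hc]; simp [hc]
        | false => rw [hr, PySem.Dict.setdefault_of_not_contains _ _ hc]; simp [hc]
      have hnd1 : (navStep1 d nb).keys.Nodup := nodup_foldl_step1 [nb] d hnd
      rw [h2, hA, ih _ hnd1]
    | true =>
      cases hc : d.contains (pvLink nb) with
      | false =>
        have hA : navStepA d nb = d.insert (pvLink nb) nb := by
          unfold navStepA; simp [hc]
        have h1 : navStep1 d nb = d.insert (pvLink nb) nb := by
          unfold navStep1; exact PySem.Dict.setdefault_of_not_contains _ _ hc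
        have hndi : (d.insert (pvLink nb) nb).keys.Nodup := PySem.Dict.nodup_keys_insert _ _ _ hnd
        have hY : (t.foldl navStep1 (d.insert (pvLink nb) nb)).get? (pvLink nb) = some nb :=
          get?_foldl_step1 t _ (PySem.Dict.get?_insert_self _ _ _)
        have hYnd : (t.foldl navStep1 (d.insert (pvLink nb) nb)).keys.Nodup :=
          nodup_foldl_step1 t _ hndi
        have h2 : navStep2 (t.foldl navStep1 (d.insert (pvLink nb) nb)) nb
            = t.foldl navStep1 (d.insert (pvLink nb) nb) := by
          unfold navStep2; rw [hr, if_pos rfl]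
          exact ins_self _ _ _ hYnd hY
        rw [hA, h1, h2, ih _ hndi]
      | true =>
        have hA : navStepA d nb = d.insert (pvLink nb) nb := by
          unfold navStepA; simp [hc, hr]
        have h1 : navStep1 d nb = d := PySem.Dict.setdefault_of_contains _ _ hc
        have h2 : navStep2 (t.foldl navStep1 d) nb = (t.foldl navStep1 d).insert (pvLink nb) nb := by
          unfold navStep2; rw [hr, if_pos rfl]
        rw [hA, h1, h2, ← foldl_step1_insert t d nb hnd hc,
            ih _ (PySem.Dict.nodup_keys_insert _ _ _ hnd)]

-- ===== VERDICT (by name: the statement is the Claim_ definition above) =====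
theorem build_nav_lookup_spec : Claim_equal_build_nav_lookup := by
  intro all _ _
  unfold Spec_build_nav_lookup build_nav_lookup build_nav_lookup_alt
  rw [← List.foldl_flatten, main_lemma _ _ PySem.Dict.nodup_keys_empty]
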